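-- pv_equiv track=rewrite | github.com/JungYoonShin/Algorithm | 프로그래머스/LV.2/퍼즐게임챌린지.py | solution
-- ===== SOURCE A (Python) =====
-- def solution(diffs, times, limit):
--     start = 1
--     end = max(diffs)
--     answer = end
--
--     while start <= end:
--         level = (start+end)//2
--         time = times[0]
--
--         for i in range(1, len(diffs)):
--             if diffs[i] > level:
--                 fail = diffs[i] - level
--                 time_curr = times[i]
--                 time_prev = times[i-1]
--
--                 time += (time_curr + time_prev) * fail + time_curr
--             else:
--                 time += times[i]
--
--         if time <= limit:
--             end = level-1
--             answer = level
--
--         else: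
--             start = level + 1
--
--     return answer
-- ===== SOURCE B (Python) =====
-- def solution(diffs, times, limit):
--     n = len(diffs)
--     base = sum(times[:n])
--     items = sorted(((d, tp + tc) for d, tp, tc in zip(diffs[1:], times, times[1:])), key=lambda t: t[0])
--     m = len(items)
--     # cum[k] = (d_k, sum of c over items[k:], sum of c*d over items[k:])
--     cum = []
--     sc = 0
--     sw = 0
--     for d, c in reversed(items):
--         sc += c
--         sw += c * d
--         cum.append((d, sc, sw))
--     cum.reverse()
--
--     def total(level):
--         # first index whose d exceeds level (items are sorted by d)
--         lo, hi = 0, m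
--         while lo < hi:
--             mid = (lo + hi) // 2
--             if cum[mid][0] > level:
--                 hi = mid
--             else:
--                 lo = mid + 1
--         if lo == m:
--             return base
--         _, sc_k, sw_k = cum[lo]
--         return base + sw_k - sc_k * level
--
--     start = 1
--     end = max(diffs)
--     answer = end
--     while start <= end:
--         level = (start + end) // 2
--         if total(level) <= limit:
--             answer = level
--             end = level - 1
--         else:
--             start = level + 1
--     return answer
-- ===== Notes on version B (the rewrite author's own statement) =====
-- stated objective: faster
-- what changed: Each feasibility probe of the outer binary search no longer rescans all puzzles: B pre-sorts the (difficulty, time_cur+time_prev) pairs once and builds suffix sums, so the total time at a level is obtained by an inner binary search over difficulties plus one closed-form suffix evaluation instead of an O(n) loop.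
import Mathlib
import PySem

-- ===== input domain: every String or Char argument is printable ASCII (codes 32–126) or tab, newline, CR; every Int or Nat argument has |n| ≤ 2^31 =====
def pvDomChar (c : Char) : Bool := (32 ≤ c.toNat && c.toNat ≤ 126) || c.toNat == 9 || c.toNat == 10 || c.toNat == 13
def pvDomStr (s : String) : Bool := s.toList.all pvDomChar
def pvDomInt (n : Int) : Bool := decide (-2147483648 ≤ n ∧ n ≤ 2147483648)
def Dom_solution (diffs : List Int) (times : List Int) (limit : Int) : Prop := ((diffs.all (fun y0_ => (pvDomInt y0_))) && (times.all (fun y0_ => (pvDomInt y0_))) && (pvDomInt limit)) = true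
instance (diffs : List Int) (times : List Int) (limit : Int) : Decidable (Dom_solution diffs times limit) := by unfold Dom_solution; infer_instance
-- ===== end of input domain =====

-- B replaces A's O(n) rescan per binary-search probe by a once-sorted list of
-- (difficulty, prev+cur time) pairs with suffix sums, answering each probe by an
-- inner binary search plus a closed-form evaluation.

-- ===== PORT A =====
def timeA (diffs times : List Int) (level : Int) : Int :=
  (PySem.List.pyRange 1 (diffs.length : Int) 1).foldl
    (fun time i =>
      if PySem.List.pyGetD diffs i 0 > level then
        let fail := PySem.List.pyGetD diffs i 0 - level
        let time_curr := PySem.List.pyGetD times i 0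
        let time_prev := PySem.List.pyGetD times (i - 1) 0
        time + (time_curr + time_prev) * fail + time_curr
      else
        time + PySem.List.pyGetD times i 0)
    (PySem.List.pyGetD times 0 0)

-- the while loop, made total by a fuel that bounds its iteration count
-- ((e + 1 - s).toNat at entry; each pass shrinks the interval by at least one)
def loopA (diffs times : List Int) (limit : Int) : Nat → Int → Int → Int → Int
  | 0, _, _, ans => ans
  | fuel + 1, s, e, ans =>
    if s ≤ e then
      let level := PySem.Int.floordiv (s + e) 2
      if timeA diffs times level ≤ limit then
        loopA diffs times limit fuel s (level - 1) level
      else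
        loopA diffs times limit fuel (level + 1) e ans
    else ans

def solution (diffs : List Int) (times : List Int) (limit : Int) : Int :=
  let e := (PySem.List.max? diffs (fun x => x)).getD 0
  loopA diffs times limit (e + 1 - 1).toNat 1 e e

-- ===== PORT B =====
-- suffix accumulation: Python's reversed-iteration loop plus final reverse,
-- rendered as structural recursion peeking at the already-built suffix
def cumListB : List (Int × Int) → List (Int × Int × Int)
  | [] => []
  | (d, c) :: rest =>
    match cumListB rest with
    | [] => [(d, c, c * d)]
    | (d', sc, sw) :: r => (d, c + sc, c * d + sw) :: (d', sc, sw) :: r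

-- the inner while loop, with fuel (hi - lo).toNat at entry
def bisectB (cum : List (Int × Int × Int)) (level : Int) : Nat → Int → Int → Int
  | 0, lo, _ => lo
  | fuel + 1, lo, hi =>
    if lo < hi then
      let mid := PySem.Int.floordiv (lo + hi) 2
      if (PySem.List.pyGetD cum mid (0, 0, 0)).1 > level then
        bisectB cum level fuel lo mid
      else
        bisectB cum level fuel (mid + 1) hi
    else lo

def totalB (base : Int) (cum : List (Int × Int × Int)) (m level : Int) : Int :=
  let lo := bisectB cum level (m - 0).toNat 0 m
  if lo == m then base
  else
    let t := PySem.List.pyGetD cum lo (0, 0, 0)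
    base + t.2.2 - t.2.1 * level

-- the outer while loop of B, with the same fuel bound as A's
def loopB (base : Int) (cum : List (Int × Int × Int)) (m limit : Int) : Nat → Int → Int → Int → Int
  | 0, _, _, ans => ans
  | fuel + 1, s, e, ans =>
    if s ≤ e then
      let level := PySem.Int.floordiv (s + e) 2
      if totalB base cum m level ≤ limit then
        loopB base cum m limit fuel s (level - 1) level
      else
        loopB base cum m limit fuel (level + 1) e ans
    else ans

def solution_alt (diffs : List Int) (times : List Int) (limit : Int) : Int :=
  let base := (PySem.List.slice times none (some (diffs.length : Int))).sum
  let items := PySem.List.sorted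
      (((PySem.List.slice diffs (some 1) none).zip
          (times.zip (PySem.List.slice times (some 1) none))).map
        (fun p => (p.1, p.2.1 + p.2.2)))
      (fun p => p.1) false
  let m : Int := items.length
  let cum := cumListB items
  let e := (PySem.List.max? diffs (fun x => x)).getD 0
  loopB base cum m limit (e + 1 - 1).toNat 1 e e

-- ===== PRECONDITION & SPEC =====
-- Pre_ is exactly where the Python A returns: max(diffs) needs a nonempty diffs,
-- and the loop reads times[i] for every i < len(diffs) (IndexError otherwise).
def Pre_solution (diffs : List Int) (times : List Int) (limit : Int) : Prop :=
  diffs ≠ [] ∧ diffs.length ≤ times.length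
instance (diffs : List Int) (times : List Int) (limit : Int) : Decidable (Pre_solution diffs times limit) := by unfold Pre_solution; infer_instance

def pvWitness_solution : List Int × List Int × Int := ([1], [1], 0)

def Spec_solution (diffs : List Int) (times : List Int) (limit : Int) (out : Int) : Prop := out = solution_alt diffs times limit
instance (diffs : List Int) (times : List Int) (limit : Int) (out : Int) : Decidable (Spec_solution diffs times limit out) := by unfold Spec_solution; infer_instance

-- ===== CLAIM (what is proved, stated in full; the proofs are below) =====
def Claim_equal_solution : Prop := ∀ (diffs : List Int) (times : List Int) (limit : Int), Dom_solution diffs times limit → Pre_solution diffs times limit → Spec_solution diffs times limit (solution diffs times limit)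

-- ===== LEMMAS AND PROOFS =====

-- floor division by the positive literal 2 is Euclidean division
lemma pvFloordivTwo (a : Int) : PySem.Int.floordiv a 2 = a / 2 := by
  simp [PySem.Int.floordiv, Int.fdiv_eq_ediv]

-- the per-puzzle extra cost at a given level
def fCon (level : Int) (p : Int × Int) : Int := if p.1 > level then p.2 * (p.1 - level) else 0
def sumF (level : Int) (l : List (Int × Int)) : Int := (l.map (fCon level)).sum
def sumC (l : List (Int × Int)) : Int := (l.map (fun p => p.2)).sum
def sumW (l : List (Int × Int)) : Int := (l.map (fun p => p.2 * p.1)).sum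

def rawOf (diffs times : List Int) : List (Int × Int) :=
  (diffs.tail.zip (times.zip times.tail)).map (fun p => (p.1, p.2.1 + p.2.2))
def itemsOf (diffs times : List Int) : List (Int × Int) :=
  PySem.List.sorted (rawOf diffs times) (fun p => p.1) false

lemma raw_length (diffs times : List Int) (h : diffs.length ≤ times.length) :
    (rawOf diffs times).length = diffs.length - 1 := by
  simp [rawOf]; omega

lemma raw_getD (diffs times : List Int) (h : diffs.length ≤ times.length)
    (m : Nat) (hm : m + 1 < diffs.length) :
    (rawOf diffs times).getD m (0, 0)
      = (diffs.getD (m + 1) 0, times.getD m 0 + times.getD (m + 1) 0) := by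
  have hlen : m < (rawOf diffs times).length := by simp [rawOf]; omega
  rw [List.getD_eq_getElem _ _ hlen, List.getD_eq_getElem _ _ (by omega : m + 1 < diffs.length),
      List.getD_eq_getElem _ _ (by omega : m < times.length), List.getD_eq_getElem _ _ (by omega : m + 1 < times.length)]
  simp [rawOf, List.getElem_zip, List.getElem_tail]

lemma timeA_eq (diffs times : List Int) (level : Int)
    (hne : diffs ≠ []) (h : diffs.length ≤ times.length) :
    timeA diffs times level
      = (times.take diffs.length).sum + sumF level (rawOf diffs times) := by
  have hn : 1 ≤ diffs.length := List.length_pos_iff.mpr hne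
  have aux : ∀ m : Nat, m ≤ diffs.length - 1 →
      (List.range m).foldl
        (fun (time : Int) (k : Nat) =>
          if PySem.List.pyGetD diffs (1 + (k : Int)) 0 > level then
            time + (PySem.List.pyGetD times (1 + (k : Int)) 0 + PySem.List.pyGetD times (1 + (k : Int) - 1) 0)
                * (PySem.List.pyGetD diffs (1 + (k : Int)) 0 - level) + PySem.List.pyGetD times (1 + (k : Int)) 0
          else
            time + PySem.List.pyGetD times (1 + (k : Int)) 0)
        (PySem.List.pyGetD times 0 0)
      = (times.take (m + 1)).sum + sumF level ((rawOf diffs times).take m) := by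
    intro m
    induction m with
    | zero =>
      intro _
      have h0 : PySem.List.pyGetD times ((0 : Nat) : Int) 0 = times.getD 0 0 :=
        PySem.List.pyGetD_natCast times 0 0
      cases times with
      | nil => exact absurd (by simpa using h) hne
      | cons t ts =>
        simp only [List.range_zero, List.foldl_nil, sumF, List.take, List.map_nil,
          List.sum_nil]
        simp only [Nat.cast_zero] at h0
        simp [h0]
    | succ m ih =>
      intro hm
      have ihv := ih (by omega)
      rw [List.range_succ, List.foldl_append, ihv]
      simp only [List.foldl_cons, List.foldl_nil]
      have e1 : (1 : Int) + (m : Int) = ((m + 1 : Nat) : Int) := by omega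
      have e2 : (1 : Int) + (m : Int) - 1 = ((m : Nat) : Int) := by omega
      rw [e2, e1]
      rw [PySem.List.pyGetD_natCast diffs (m+1) 0, PySem.List.pyGetD_natCast times (m+1) 0,
          PySem.List.pyGetD_natCast times m 0]
      have ht : times.take (m + 1 + 1) = times.take (m + 1) ++ [times.getD (m + 1) 0] := by
        rw [List.take_add_one, List.getElem?_eq_getElem (by omega : m + 1 < times.length),
            List.getD_eq_getElem _ _ (by omega : m + 1 < times.length)]
        rfl
      have hr : (rawOf diffs times).take (m + 1)
          = (rawOf diffs times).take m ++ [(rawOf diffs times).getD m (0,0)] := by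
        have hlen : m < (rawOf diffs times).length := by rw [raw_length diffs times h]; omega
        rw [List.take_add_one, List.getElem?_eq_getElem hlen, List.getD_eq_getElem _ _ hlen]
        rfl
      rw [ht, hr, raw_getD diffs times h m (by omega)]
      simp only [List.sum_append, List.sum_cons, List.sum_nil, sumF, List.map_append,
        List.map_cons, List.map_nil]
      rw [fCon]
      split_ifs with hd
      · ring
      · ring
  have hrange : PySem.List.pyRange 1 (diffs.length : Int) 1
      = (List.range (diffs.length - 1)).map (fun k : Nat => 1 + (k : Int)) := by
    rw [PySem.List.pyRange_one]
    rw [show (((diffs.length : Int)) - 1).toNat = diffs.length - 1 from by omega]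
  have haux := aux (diffs.length - 1) (le_refl _)
  rw [show diffs.length - 1 + 1 = diffs.length from by omega,
      List.take_of_length_le (i := diffs.length - 1) (l := rawOf diffs times)
        (by rw [raw_length diffs times h])] at haux
  rw [timeA, hrange, List.foldl_map]
  exact haux

def cumSpec : List (Int × Int) → List (Int × Int × Int)
  | [] => []
  | (d, c) :: r => (d, c + sumC r, c * d + sumW r) :: cumSpec r

lemma cumListB_eq (s : List (Int × Int)) : cumListB s = cumSpec s := by
  induction s with
  | nil => rfl
  | cons x r ih =>
    obtain ⟨d, c⟩ := x
    rw [cumListB, ih]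
    cases r with
    | nil => simp [cumSpec, sumC, sumW]
    | cons y r' =>
      obtain ⟨d', c'⟩ := y
      simp only [cumSpec, sumC, sumW, List.map_cons, List.sum_cons]

lemma cumSpec_getD (s : List (Int × Int)) (j : Nat) (hj : j < s.length) :
    (cumSpec s).getD j (0, 0, 0)
      = ((s.getD j (0, 0)).1, sumC (s.drop j), sumW (s.drop j)) := by
  induction s generalizing j with
  | nil => simp at hj
  | cons x r ih =>
    obtain ⟨d, c⟩ := x
    cases j with
    | zero => simp [cumSpec, sumC, sumW]
    | succ j' =>
      simp only [cumSpec, List.getD_cons_succ, List.drop_succ_cons]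
      exact ih j' (by simpa using Nat.lt_of_succ_lt_succ hj)

lemma items_mono (items : List (Int × Int))
    (hp : items.Pairwise (fun a b => a.1 ≤ b.1)) (i j : Nat)
    (hij : i ≤ j) (hj : j < items.length) :
    (items.getD i (0, 0)).1 ≤ (items.getD j (0, 0)).1 := by
  rcases Nat.eq_or_lt_of_le hij with rfl | hlt
  · exact le_refl _
  · rw [List.getD_eq_getElem _ _ (by omega), List.getD_eq_getElem _ _ hj]
    exact (List.pairwise_iff_getElem.mp hp) i j (by omega) hj hlt

lemma probe_fst (items : List (Int × Int)) (mid : Int)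
    (h0 : 0 ≤ mid) (hm : mid < items.length) :
    (PySem.List.pyGetD (cumListB items) mid (0, 0, 0)).1
      = (items.getD mid.toNat (0, 0)).1 := by
  rw [cumListB_eq]
  rw [PySem.List.pyGetD_of_nonneg (h := h0)]
  rw [cumSpec_getD items mid.toNat (by omega)]

lemma bisect_spec (items : List (Int × Int)) (level : Int)
    (hp : items.Pairwise (fun a b => a.1 ≤ b.1)) :
    ∀ (n : Nat) (lo hi : Int), (hi - lo).toNat ≤ n →
    0 ≤ lo → lo ≤ hi → hi ≤ items.length →
    (∀ j : Nat, (j : Int) < lo → j < items.length → (items.getD j (0, 0)).1 ≤ level) →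
    (∀ j : Nat, hi ≤ (j : Int) → j < items.length → level < (items.getD j (0, 0)).1) →
    (0 ≤ bisectB (cumListB items) level n lo hi ∧
     bisectB (cumListB items) level n lo hi ≤ items.length ∧
     (∀ j : Nat, (j : Int) < bisectB (cumListB items) level n lo hi → j < items.length →
        (items.getD j (0, 0)).1 ≤ level) ∧
     (∀ j : Nat, bisectB (cumListB items) level n lo hi ≤ (j : Int) → j < items.length →
        level < (items.getD j (0, 0)).1)) := by
  intro n
  induction n with
  | zero =>
    intro lo hi hfuel h0 hlh hhm hL hH
    rw [bisectB]
    exact ⟨h0, by exact_mod_cast le_trans hlh hhm, hL,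
      fun j hj hjl => hH j (by omega) hjl⟩
  | succ n ih =>
    intro lo hi hfuel h0 hlh hhm hL hH
    by_cases hlt : lo < hi
    · rw [bisectB]
      simp only [if_pos hlt, pvFloordivTwo]
      have hmb1 : lo ≤ (lo + hi) / 2 := by omega
      have hmb2 : (lo + hi) / 2 < hi := by omega
      have hmlen : (lo + hi) / 2 < (items.length : Int) := by omega
      rw [probe_fst items _ (by omega) hmlen]
      by_cases hprobe : (items.getD ((lo + hi) / 2).toNat (0, 0)).1 > level
      · rw [if_pos hprobe]
        exact ih lo ((lo + hi) / 2) (by omega) h0 hmb1 (by omega) hL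
          (fun j hj hjl => lt_of_lt_of_le hprobe
            (items_mono items hp _ j (by omega) hjl))
      · rw [if_neg hprobe]
        exact ih ((lo + hi) / 2 + 1) hi (by omega) (by omega) (by omega) hhm
          (fun j hj hjl => le_trans
            (items_mono items hp j (((lo + hi) / 2).toNat) (by omega)
              (by omega)) (not_lt.mp hprobe))
          hH
    · rw [bisectB, if_neg hlt]
      exact ⟨h0, by exact_mod_cast le_trans hlh hhm, hL,
        fun j hj hjl => hH j (by omega) hjl⟩

lemma sumF_suffix (level : Int) (l : List (Int × Int))
    (h : ∀ p ∈ l, level < p.1) :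
    sumF level l = sumW l - level * sumC l := by
  induction l with
  | nil => simp [sumF, sumW, sumC]
  | cons x r ih =>
    have hx := h x (by simp)
    have := ih (fun p hp => h p (by simp [hp]))
    simp only [sumF, sumW, sumC, List.map_cons, List.sum_cons] at *
    rw [fCon, if_pos hx]
    ring_nf
    linarith [this]

lemma sumF_zero (level : Int) (l : List (Int × Int))
    (h : ∀ p ∈ l, ¬ level < p.1) :
    sumF level l = 0 := by
  induction l with
  | nil => simp [sumF]
  | cons x r ih =>
    have hx := h x (by simp)
    simp only [sumF, List.map_cons, List.sum_cons] at *
    rw [fCon, if_neg (by exact hx)]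
    simp [ih (fun p hp => h p (by simp [hp]))]

lemma sumF_split (level : Int) (items : List (Int × Int)) (k : Nat)
    (_hk : k ≤ items.length)
    (hL : ∀ j : Nat, j < k → j < items.length → (items.getD j (0, 0)).1 ≤ level)
    (hH : ∀ j : Nat, k ≤ j → j < items.length → level < (items.getD j (0, 0)).1) :
    sumF level items = sumW (items.drop k) - level * sumC (items.drop k) := by
  have hsplit : items.take k ++ items.drop k = items := List.take_append_drop k items
  have h1 : sumF level (items.take k) = 0 := by
    apply sumF_zero
    intro p hp
    obtain ⟨j, hj, hjp⟩ := List.mem_take_iff_getElem.mp hp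
    have hjk : j < k := lt_of_lt_of_le hj (min_le_left _ _)
    have hjl : j < items.length := lt_of_lt_of_le hj (min_le_right _ _)
    have := hL j hjk hjl
    rw [List.getD_eq_getElem _ _ hjl, hjp] at this
    omega
  have h2 : ∀ p ∈ items.drop k, level < p.1 := by
    intro p hp
    obtain ⟨j, hj, hjp⟩ := List.mem_drop_iff_getElem.mp hp
    have := hH (k + j) (by omega) (by omega)
    rw [List.getD_eq_getElem _ _ (by omega), hjp] at this
    exact this
  calc sumF level items = sumF level (items.take k) + sumF level (items.drop k) := by
        rw [← hsplit]; simp [sumF, List.take_append_drop]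
    _ = sumW (items.drop k) - level * sumC (items.drop k) := by
        rw [h1, sumF_suffix level _ h2]; ring

lemma totalB_eq (items : List (Int × Int)) (base level : Int)
    (hp : items.Pairwise (fun a b => a.1 ≤ b.1)) :
    totalB base (cumListB items) (items.length : Int) level = base + sumF level items := by
  obtain ⟨hr0, hrlen, hLow, hHigh⟩ :=
    bisect_spec items level hp (((items.length : Int) - 0).toNat) 0 (items.length : Int)
      (le_refl _) (by omega) (by exact_mod_cast Nat.cast_nonneg _) (le_refl _)
      (fun j hj _ => absurd hj (by omega))
      (fun j hj hjl => absurd hj (by omega))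
  set r := bisectB (cumListB items) level (((items.length : Int) - 0).toNat) 0 (items.length : Int) with hrdef
  have hkey : sumF level items = sumW (items.drop r.toNat) - level * sumC (items.drop r.toNat) := by
    apply sumF_split level items r.toNat (by omega)
    · intro j hj hjl
      exact hLow j (by omega) hjl
    · intro j hj hjl
      exact hHigh j (by omega) hjl
  rw [totalB]
  by_cases hr : r = (items.length : Int)
  · rw [if_pos (by simpa using hr)]
    have : items.drop r.toNat = [] := by
      apply List.drop_eq_nil_of_le
      omega
    rw [this] at hkey
    simp [sumW, sumC] at hkey
    rw [hkey]
    ring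
  · rw [if_neg (by simpa using hr)]
    have hrl : r.toNat < items.length := by omega
    have hprobe : PySem.List.pyGetD (cumListB items) r (0, 0, 0)
        = ((items.getD r.toNat (0, 0)).1, sumC (items.drop r.toNat), sumW (items.drop r.toNat)) := by
      rw [cumListB_eq, PySem.List.pyGetD_of_nonneg (h := hr0), cumSpec_getD items r.toNat hrl]
    rw [hprobe]
    show base + sumW (items.drop r.toNat) - sumC (items.drop r.toNat) * level
        = base + sumF level items
    rw [hkey]
    ring

lemma loops_eq (diffs times : List Int) (base limit : Int)
    (cum : List (Int × Int × Int)) (m : Int)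
    (htot : ∀ level, totalB base cum m level = timeA diffs times level) :
    ∀ (n : Nat) (s e ans : Int),
      loopA diffs times limit n s e ans = loopB base cum m limit n s e ans := by
  intro n
  induction n with
  | zero => intro s e ans; rw [loopA, loopB]
  | succ n ih =>
    intro s e ans
    by_cases hse : s ≤ e
    · rw [loopA, loopB]
      simp only [if_pos hse, pvFloordivTwo, htot]
      by_cases hfeas : timeA diffs times ((s + e) / 2) ≤ limit
      · rw [if_pos hfeas, if_pos hfeas]
        exact ih s ((s + e) / 2 - 1) _
      · rw [if_neg hfeas, if_neg hfeas]
        exact ih ((s + e) / 2 + 1) e ans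
    · rw [loopA, if_neg hse, loopB, if_neg hse]

-- ===== VERDICT (by name: the statement is the Claim_ definition above) =====
theorem solution_spec : Claim_equal_solution := by
  intro diffs times limit _hdom hpre
  obtain ⟨hne, hlen⟩ := hpre
  unfold Spec_solution solution solution_alt
  simp only [PySem.List.slice_from_one, PySem.List.slice_to_natCast]
  have hperm : (itemsOf diffs times).Perm (rawOf diffs times) :=
    PySem.List.sorted_perm (rawOf diffs times) (fun p : Int × Int => p.1) false
  have hp : (itemsOf diffs times).Pairwise (fun a b => a.1 ≤ b.1) :=
    PySem.List.sorted_pairwise (rawOf diffs times) (fun p : Int × Int => p.1)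
  have htot : ∀ level,
      totalB ((times.take diffs.length).sum) (cumListB (itemsOf diffs times))
          ((itemsOf diffs times).length : Int) level
        = timeA diffs times level := by
    intro level
    rw [totalB_eq _ _ _ hp, timeA_eq diffs times level hne hlen]
    congr 1
    exact List.Perm.sum_eq (hperm.map (fCon level))
  exact loops_eq diffs times ((times.take diffs.length).sum) limit
    (cumListB (itemsOf diffs times)) ((itemsOf diffs times).length : Int) htot
    (((PySem.List.max? diffs (fun x => x)).getD 0 + 1 - 1).toNat) 1
    ((PySem.List.max? diffs (fun x => x)).getD 0)
    ((PySem.List.max? diffs (fun x => x)).getD 0)
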